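-- pv_equiv track=rewrite | github.com/pypi-data/pypi-mirror-389 | packages/securecode-ai/securecode_ai-1.0.0.tar.gz/securecode_ai-1.0.0/src/securecli/modules/auditors.py | _detect_architectural_patterns
-- ===== SOURCE A (Python) =====
-- from typing import Dict, List, Any
--
-- def _detect_architectural_patterns(context: Dict[str, Any]) -> List[str]:
--     """Detect architectural patterns from files and structure"""
--
--     patterns = []
--     files = context.get('target_files', [])
--
--     # Detect common patterns
--     file_names = [f.split('/')[-1].lower() for f in files]
--
--     if any('controller' in name for name in file_names):
--         patterns.append('MVC')
--     if any('service' in name for name in file_names):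
--         patterns.append('Service Layer')
--     if any('repository' in name or 'dao' in name for name in file_names):
--         patterns.append('Repository Pattern')
--     if any('middleware' in name for name in file_names):
--         patterns.append('Middleware Pattern')
--     if any('model' in name for name in file_names):
--         patterns.append('Domain Model')
--
--     return patterns
-- ===== SOURCE B (Python) =====
-- def _detect_architectural_patterns(context):
--     """Single pass: one loop over the files maintaining five boolean flags,
--     then emit the labels in the fixed canonical order."""
--     files = context.get('target_files', [])
--     has_controller = has_service = has_repo = has_middleware = has_model = False
--     for f in files:
--         name = f.split('/')[-1].lower()
--         has_controller = has_controller or 'controller' in name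
--         has_service = has_service or 'service' in name
--         has_repo = has_repo or 'repository' in name or 'dao' in name
--         has_middleware = has_middleware or 'middleware' in name
--         has_model = has_model or 'model' in name
--     out = []
--     if has_controller:
--         out.append('MVC')
--     if has_service:
--         out.append('Service Layer')
--     if has_repo:
--         out.append('Repository Pattern')
--     if has_middleware:
--         out.append('Middleware Pattern')
--     if has_model:
--         out.append('Domain Model')
--     return out
-- ===== Notes on version B (the rewrite author's own statement) =====
-- stated objective: alternative
-- what changed: Replaces the five separate any()-scans over the lowered basenames with a single loop over the files that maintains five boolean flags (computing each basename once, inline) and then emits the labels in the fixed canonical order.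
import Mathlib
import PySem

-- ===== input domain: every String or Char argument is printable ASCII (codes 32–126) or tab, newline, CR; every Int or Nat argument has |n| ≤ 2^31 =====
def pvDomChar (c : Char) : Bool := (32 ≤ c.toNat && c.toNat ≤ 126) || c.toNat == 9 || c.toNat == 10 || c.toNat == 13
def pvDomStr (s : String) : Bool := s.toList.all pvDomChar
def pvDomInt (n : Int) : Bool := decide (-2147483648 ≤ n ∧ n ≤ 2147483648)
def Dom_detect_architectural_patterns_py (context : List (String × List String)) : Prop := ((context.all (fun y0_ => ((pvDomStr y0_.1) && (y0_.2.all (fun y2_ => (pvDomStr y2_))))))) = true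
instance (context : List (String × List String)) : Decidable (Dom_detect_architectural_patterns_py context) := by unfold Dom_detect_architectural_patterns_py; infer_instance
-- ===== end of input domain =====

-- B replaces A's five separate any()-scans with a single fold maintaining five boolean flags (alternative decomposition, same cost class).


-- ===== PORT A =====
-- shared helper: f.split('/')[-1].lower()
def pvBaseName (f : String) : String :=
  String.ofList (PySem.Chars.lower (PySem.List.pyGetD (PySem.Chars.splitOn f.toList "/".toList) (-1) []))

def detect_architectural_patterns_py (context : List (String × List String)) : List String :=
  let patterns : List String := []
  let files := PySem.Dict.getD (PySem.Dict.mk context) "target_files" []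
  let file_names := files.map pvBaseName
  let patterns := if file_names.any (fun name => PySem.Str.isIn "controller" name) then patterns ++ ["MVC"] else patterns
  let patterns := if file_names.any (fun name => PySem.Str.isIn "service" name) then patterns ++ ["Service Layer"] else patterns
  let patterns := if file_names.any (fun name => PySem.Str.isIn "repository" name || PySem.Str.isIn "dao" name) then patterns ++ ["Repository Pattern"] else patterns
  let patterns := if file_names.any (fun name => PySem.Str.isIn "middleware" name) then patterns ++ ["Middleware Pattern"] else patterns
  let patterns := if file_names.any (fun name => PySem.Str.isIn "model" name) then patterns ++ ["Domain Model"] else patterns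
  patterns

-- ===== PORT B =====
-- single fold over the files maintaining five boolean flags, computing each basename once
def pvStep (s : Bool × Bool × Bool × Bool × Bool) (f : String) : Bool × Bool × Bool × Bool × Bool :=
  let name := pvBaseName f
  (s.1 || PySem.Str.isIn "controller" name,
   s.2.1 || PySem.Str.isIn "service" name,
   s.2.2.1 || (PySem.Str.isIn "repository" name || PySem.Str.isIn "dao" name),
   s.2.2.2.1 || PySem.Str.isIn "middleware" name,
   s.2.2.2.2 || PySem.Str.isIn "model" name)

def detect_architectural_patterns_py_alt (context : List (String × List String)) : List String :=
  let files := PySem.Dict.getD (PySem.Dict.mk context) "target_files" []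
  let flags := files.foldl pvStep (false, false, false, false, false)
  (if flags.1 then ["MVC"] else []) ++
  (if flags.2.1 then ["Service Layer"] else []) ++
  (if flags.2.2.1 then ["Repository Pattern"] else []) ++
  (if flags.2.2.2.1 then ["Middleware Pattern"] else []) ++
  (if flags.2.2.2.2 then ["Domain Model"] else [])

-- ===== PRECONDITION & SPEC =====
def Spec_detect_architectural_patterns_py (context : List (String × List String)) (out : List String) : Prop := out = detect_architectural_patterns_py_alt context
instance (context : List (String × List String)) (out : List String) : Decidable (Spec_detect_architectural_patterns_py context out) := by unfold Spec_detect_architectural_patterns_py; infer_instance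

-- ===== CLAIM (what is proved, stated in full; the proofs are below) =====
def Claim_equal_detect_architectural_patterns_py : Prop := ∀ (context : List (String × List String)), Dom_detect_architectural_patterns_py context → Spec_detect_architectural_patterns_py context (detect_architectural_patterns_py context)

-- ===== LEMMAS AND PROOFS =====
-- the fold of the five-flag step computes the five any-scans at once
theorem pvFoldl_step (files : List String) (b1 b2 b3 b4 b5 : Bool) :
    files.foldl pvStep (b1, b2, b3, b4, b5) =
      (b1 || files.any (fun f => PySem.Str.isIn "controller" (pvBaseName f)),
       b2 || files.any (fun f => PySem.Str.isIn "service" (pvBaseName f)),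
       b3 || files.any (fun f => PySem.Str.isIn "repository" (pvBaseName f) || PySem.Str.isIn "dao" (pvBaseName f)),
       b4 || files.any (fun f => PySem.Str.isIn "middleware" (pvBaseName f)),
       b5 || files.any (fun f => PySem.Str.isIn "model" (pvBaseName f))) := by
  induction files generalizing b1 b2 b3 b4 b5 with
  | nil => simp
  | cons f fs ih =>
    simp only [List.foldl_cons, List.any_cons, pvStep, ih]
    simp [Bool.or_assoc]

-- ===== VERDICT (by name: the statement is the Claim_ definition above) =====
theorem detect_architectural_patterns_py_spec : Claim_equal_detect_architectural_patterns_py := by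
  intro context _
  show detect_architectural_patterns_py context = detect_architectural_patterns_py_alt context
  simp only [detect_architectural_patterns_py, detect_architectural_patterns_py_alt,
    pvFoldl_step, List.any_map, Function.comp_def, Bool.false_or, List.nil_append]
  split_ifs <;> rfl
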